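-- pv_equiv track=rewrite | github.com/realanupreet/glaringharmfulbinary | nearlyluckynumber.py | chkl
-- ===== SOURCE A (Python) =====
-- def chkl(n):
--     n = str(n)
--     for c in n:
--         if c == "4" or c == "7":
--             pass
--         else:
--             return False
--     return True
-- ===== SOURCE B (Python) =====
-- def chkl(n):
--     s = str(n)
--     return s.replace("4", "").replace("7", "") == ""
-- ===== Notes on version B (the rewrite author's own statement) =====
-- stated objective: idiomatic
-- what changed: Replaced the per-digit early-returning membership loop by a whole-string rewrite: strip every '4' and '7' via str.replace and test whether the residue is empty.
import Mathlib
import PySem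

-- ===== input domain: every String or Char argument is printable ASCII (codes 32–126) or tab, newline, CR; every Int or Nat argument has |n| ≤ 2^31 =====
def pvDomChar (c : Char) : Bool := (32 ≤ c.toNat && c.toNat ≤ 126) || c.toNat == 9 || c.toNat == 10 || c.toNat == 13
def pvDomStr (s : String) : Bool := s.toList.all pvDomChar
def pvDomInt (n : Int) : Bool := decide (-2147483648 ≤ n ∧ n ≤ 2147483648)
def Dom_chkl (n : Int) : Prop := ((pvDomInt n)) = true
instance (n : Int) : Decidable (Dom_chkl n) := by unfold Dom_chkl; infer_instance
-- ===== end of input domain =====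

-- B rewrites the whole string (delete every '4' and '7', test emptiness) instead of A's per-digit early-returning loop; objective: idiomatic.

-- ===== PORT A =====
-- the 'for c in n: if c == "4" or c == "7": pass else: return False' loop
def chklLoop : List Char → Bool
  | [] => true
  | c :: t => if c = '4' ∨ c = '7' then chklLoop t else false

def chkl (n : Int) : Bool := chklLoop (PySem.Int.toStr n).toList

-- ===== PORT B =====
def chkl_alt (n : Int) : Bool :=
  PySem.Str.replace (PySem.Str.replace (PySem.Int.toStr n) "4" "") "7" "" == ""

-- ===== PRECONDITION & SPEC =====
def Spec_chkl (n : Int) (out : Bool) : Prop := out = chkl_alt n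
instance (n : Int) (out : Bool) : Decidable (Spec_chkl n out) := by unfold Spec_chkl; infer_instance

-- ===== CLAIM (what is proved, stated in full; the proofs are below) =====
def Claim_equal_chkl : Prop := ∀ (n : Int), Dom_chkl n → Spec_chkl n (chkl n)

-- ===== LEMMAS AND PROOFS =====

-- replace with a single-character pattern and empty replacement is a filter
theorem replace_go_single (c : Char) :
    ∀ (fuel : Nat) (l acc : List Char), l.length ≤ fuel →
      PySem.Chars.replace.go [c] [] fuel l acc = acc.reverse ++ l.filter (· ≠ c) := by
  intro fuel
  induction fuel with
  | zero =>
      intro l acc h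
      have : l = [] := List.eq_nil_of_length_eq_zero (Nat.le_zero.mp h)
      subst this
      simp [PySem.Chars.replace.go]
  | succ k ih =>
      intro l acc h
      cases l with
      | nil => simp [PySem.Chars.replace.go]
      | cons d t =>
          by_cases hd : d = c
          · subst hd
            have hpre : List.isPrefixOf [d] (d :: t) = true := by
              simp [List.isPrefixOf]
            rw [PySem.Chars.replace.go]
            simp only [hpre, if_true]
            rw [show List.drop [d].length (d :: t) = t from rfl,
                ih t _ (by simpa using Nat.le_of_succ_le_succ h)]
            simp
          · have hpre : List.isPrefixOf [c] (d :: t) = false := by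
              simp [List.isPrefixOf]
              exact fun hh => (hd hh.symm).elim
            rw [PySem.Chars.replace.go]
            simp only [hpre]
            rw [ih t _ (by simpa using Nat.le_of_succ_le_succ h)]
            simp [hd]

theorem replace_single (c : Char) (l : List Char) :
    PySem.Chars.replace l [c] [] = l.filter (· ≠ c) := by
  unfold PySem.Chars.replace
  simp [replace_go_single c l.length l [] (le_refl _)]

theorem chklLoop_eq_filter (l : List Char) :
    chklLoop l = ((l.filter (· ≠ '4')).filter (· ≠ '7') == []) := by
  induction l with
  | nil => simp [chklLoop]
  | cons c t ih =>
      by_cases h4 : c = '4'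
      · subst h4; simpa [chklLoop] using ih
      · by_cases h7 : c = '7'
        · subst h7; simpa [chklLoop, h4] using ih
        · simp [chklLoop, h4, h7]

theorem ofList_beq_empty (l : List Char) : (String.ofList l == "") = l.isEmpty := by
  cases l with
  | nil => rfl
  | cons c t =>
    simp only [List.isEmpty_cons]
    rw [Bool.eq_false_iff]
    intro h
    have := String.toList_ofList (l := c :: t) ▸ congrArg String.toList (eq_of_beq h)
    simp at this

-- ===== VERDICT (by name: the statement is the Claim_ definition above) =====
theorem chkl_spec : Claim_equal_chkl := by
  intro n _
  unfold Spec_chkl chkl chkl_alt PySem.Str.replace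
  rw [chklLoop_eq_filter]
  simp [replace_single, ofList_beq_empty, List.filter_filter]
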